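-- pv_equiv track=rewrite | github.com/christofhaerens/advent_of_code | 2020/14/solve.py | split_mask
-- ===== SOURCE A (Python) =====
-- def split_mask(mask):
--     mask_and = 0
--     mask_or = 0
--     for b in mask:
--         mask_and <<= 1
--         mask_or <<= 1
--         if b == 'X':
--             mask_and += 1
--         elif b == '1':
--             mask_and += 1
--             mask_or += 1
--     return mask_and, mask_or
-- ===== SOURCE B (Python) =====
-- def split_mask(mask):
--     rev = mask[::-1]
--     mask_and = sum(2 ** i for i, b in enumerate(rev) if b in ('X', '1'))
--     mask_or = sum(2 ** i for i, b in enumerate(rev) if b == '1')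
--     return mask_and, mask_or
-- ===== Notes on version B (the rewrite author's own statement) =====
-- stated objective: alternative
-- what changed: Replaces A's MSB-first shift-and-add accumulator loop by two sum-of-powers-of-two comprehensions over the enumerated reversed string (each bit contributes 2**i independently).
import Mathlib
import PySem

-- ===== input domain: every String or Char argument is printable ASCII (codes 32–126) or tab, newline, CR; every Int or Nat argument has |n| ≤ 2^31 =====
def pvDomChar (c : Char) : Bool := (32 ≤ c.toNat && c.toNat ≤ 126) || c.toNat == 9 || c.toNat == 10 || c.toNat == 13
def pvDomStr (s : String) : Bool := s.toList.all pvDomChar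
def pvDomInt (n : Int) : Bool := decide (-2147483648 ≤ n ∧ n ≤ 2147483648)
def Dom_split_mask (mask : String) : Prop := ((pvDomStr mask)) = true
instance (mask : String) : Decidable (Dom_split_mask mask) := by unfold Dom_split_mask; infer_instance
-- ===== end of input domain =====

-- B builds each result as a sum of independent powers of two over the enumerated
-- reversed string, instead of A's MSB-first shift-and-add accumulator loop (objective: alternative).

-- ===== PORT A =====
-- for b in mask: mask_and <<= 1; mask_or <<= 1; if b == 'X': …; elif b == '1': …
-- ('x <<= 1' on a Python int is exactly multiplication by 2)
def split_mask (mask : String) : Int × Int :=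
  mask.toList.foldl
    (fun (st : Int × Int) b =>
      let mask_and := st.1 * 2
      let mask_or := st.2 * 2
      if b = 'X' then (mask_and + 1, mask_or)
      else if b = '1' then (mask_and + 1, mask_or + 1)
      else (mask_and, mask_or))
    (0, 0)

-- ===== PORT B =====
-- sum(2 ** i for i, b in enumerate(rev) if <cond b>)
def sumBits (f : Char → Bool) (rev : List Char) : Int :=
  (((PySem.List.enumerate rev).filter (fun ib => f ib.2)).map
    (fun ib => (2 : Int) ^ ib.1.toNat)).sum

def split_mask_alt (mask : String) : Int × Int :=
  let rev := mask.toList.reverse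
  (sumBits (fun b => b == 'X' || b == '1') rev, sumBits (fun b => b == '1') rev)

-- ===== PRECONDITION & SPEC =====
def Spec_split_mask (mask : String) (out : Int × Int) : Prop := out = split_mask_alt mask
instance (mask : String) (out : Int × Int) : Decidable (Spec_split_mask mask out) := by unfold Spec_split_mask; infer_instance

-- ===== CLAIM (what is proved, stated in full; the proofs are below) =====
def Claim_equal_split_mask : Prop := ∀ (mask : String), Dom_split_mask mask → Spec_split_mask mask (split_mask mask)

-- ===== LEMMAS AND PROOFS =====

-- MSB-first value of a char list under a per-char bit function
def msbVal (f : Char → Bool) : List Char → Int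
  | [] => 0
  | b :: t => (if f b then 1 else 0) * 2 ^ t.length + msbVal f t

theorem foldA_eq (l : List Char) : ∀ a o : Int,
    l.foldl
      (fun (st : Int × Int) b =>
        let mask_and := st.1 * 2
        let mask_or := st.2 * 2
        if b = 'X' then (mask_and + 1, mask_or)
        else if b = '1' then (mask_and + 1, mask_or + 1)
        else (mask_and, mask_or))
      (a, o)
    = (a * 2 ^ l.length + msbVal (fun b => b == 'X' || b == '1') l,
       o * 2 ^ l.length + msbVal (fun b => b == '1') l) := by
  induction l with
  | nil => intro a o; simp [msbVal]
  | cons b t ih =>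
    intro a o
    by_cases hX : b = 'X' <;> by_cases h1 : b = '1' <;>
      simp [List.foldl_cons, hX, h1, ih, msbVal, pow_succ] <;> constructor <;> first | trivial | ring

theorem sumBits_append (f : Char → Bool) (r : List Char) (b : Char) :
    sumBits f (r ++ [b]) = sumBits f r + (if f b then (2 : Int) ^ r.length else 0) := by
  simp [sumBits, PySem.List.enumerate_append, List.filter_append, List.map_append,
    PySem.List.enumerate]
  by_cases h : f b = true <;> simp [h]

theorem sumBits_reverse (f : Char → Bool) (l : List Char) :
    sumBits f l.reverse = msbVal f l := by
  induction l with
  | nil => simp [sumBits, msbVal]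
  | cons b t ih =>
    rw [List.reverse_cons, sumBits_append, ih]
    simp [msbVal, List.length_reverse]
    by_cases h : f b = true <;> (simp [h]; try ring)

-- ===== VERDICT (by name: the statement is the Claim_ definition above) =====
theorem split_mask_spec : Claim_equal_split_mask := by
  intro mask _
  unfold Spec_split_mask split_mask split_mask_alt
  simp only [foldA_eq, sumBits_reverse]
  simp
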